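-- pv_equiv track=rewrite | github.com/fcaponetto/advent_of_code | 2023/d03/01.py | extract_symbol_positions
-- ===== SOURCE A (Python) =====
-- def is_symbol(char):
--     return not char.isalnum() and not char.isspace() and not char == '.'
--
-- def extract_symbol_positions(input_string: str) -> list:
--     """
--     It extracts the start and end position of a symbol
--     :rtype: list of tuples that include start-end positions
--     """
--     result = []
--     current_symbol = ''
--
--     for i, char in enumerate(input_string):
--         if is_symbol(char):
--             current_symbol += char
--         elif current_symbol:
--             result.append(i - len(current_symbol))
--             current_symbol = ''
--
--     # trailing number
--     if current_symbol:
--         result.append(len(input_string) - len(current_symbol))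
--
--     return result
-- ===== SOURCE B (Python) =====
-- from itertools import groupby
--
--
-- def is_symbol(char):
--     return not char.isalnum() and not char.isspace() and not char == '.'
--
--
-- def extract_symbol_positions(input_string: str) -> list:
--     """Same result via run grouping: emit the start index of each symbol run."""
--     result = []
--     pos = 0
--     for key, group in groupby(input_string, key=is_symbol):
--         n = sum(1 for _ in group)
--         if key:
--             result.append(pos)
--         pos += n
--     return result
-- ===== Notes on version B (the rewrite author's own statement) =====
-- stated objective: idiomatic
-- what changed: Replaces the accumulate-a-string-and-flush-on-run-end state machine with itertools.groupby over is_symbol: each run is consumed as a group and the running position is emitted directly for symbol runs.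
import Mathlib
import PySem

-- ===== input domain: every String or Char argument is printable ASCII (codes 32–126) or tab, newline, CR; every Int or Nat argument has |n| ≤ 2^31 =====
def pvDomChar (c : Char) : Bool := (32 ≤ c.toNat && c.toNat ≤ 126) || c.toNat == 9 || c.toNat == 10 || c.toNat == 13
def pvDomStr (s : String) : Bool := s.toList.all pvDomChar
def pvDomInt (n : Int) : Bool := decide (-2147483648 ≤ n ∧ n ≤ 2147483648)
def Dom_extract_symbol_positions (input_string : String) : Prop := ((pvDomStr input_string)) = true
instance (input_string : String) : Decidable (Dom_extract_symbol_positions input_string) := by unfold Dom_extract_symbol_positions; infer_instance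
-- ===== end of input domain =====

-- B replaces A's accumulate-and-flush state machine with grouping maximal runs (itertools.groupby); same output, same cost.

-- is_symbol, shared by both Pythons
def pvIsSymbol (c : Char) : Bool :=
  !(PySem.Chars.isalnum c) && !(PySem.Chars.isspace c) && !(c == '.')

-- ===== PORT A =====
-- the for-loop of A: state (result, current_symbol); i is the enumerate index
def pvALoop (chars : List Char) (i : Int) (res : List Int) (cur : List Char) :
    List Int × List Char :=
  match chars with
  | [] => (res, cur)
  | c :: cs =>
    if pvIsSymbol c then
      pvALoop cs (i + 1) res (cur ++ [c])
    else if cur ≠ [] then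
      pvALoop cs (i + 1) (res ++ [i - (cur.length : Int)]) []
    else
      pvALoop cs (i + 1) res cur

def extract_symbol_positions (input_string : String) : List Int :=
  let chars := input_string.toList
  let st := pvALoop chars 0 [] []
  -- trailing symbol run flushed after the loop, using len(input_string)
  if st.2 ≠ [] then st.1 ++ [(chars.length : Int) - (st.2.length : Int)] else st.1

-- ===== PORT B =====
-- groupby(input_string, key=is_symbol), ported as run-splitting recursion:
-- each step consumes one maximal run of equal key; emit pos when the key is True.
def pvBLoop (chars : List Char) (pos : Int) : List Int :=
  match chars with
  | [] => []
  | c :: cs =>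
    let k := pvIsSymbol c
    let run := (c :: cs).takeWhile (fun x => pvIsSymbol x == k)
    let rest := (c :: cs).dropWhile (fun x => pvIsSymbol x == k)
    (if k then [pos] else []) ++ pvBLoop rest (pos + (run.length : Int))
termination_by chars.length
decreasing_by
  simp only [List.dropWhile_cons, beq_self_eq_true, if_true]
  exact Nat.lt_succ_of_le (List.length_dropWhile_le _ _)

def extract_symbol_positions_alt (input_string : String) : List Int :=
  pvBLoop input_string.toList 0

-- ===== PRECONDITION & SPEC =====
def Spec_extract_symbol_positions (input_string : String) (out : List Int) : Prop := out = extract_symbol_positions_alt input_string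
instance (input_string : String) (out : List Int) : Decidable (Spec_extract_symbol_positions input_string out) := by unfold Spec_extract_symbol_positions; infer_instance

-- ===== CLAIM (what is proved, stated in full; the proofs are below) =====
def Claim_equal_extract_symbol_positions : Prop := ∀ (input_string : String), Dom_extract_symbol_positions input_string → Spec_extract_symbol_positions input_string (extract_symbol_positions input_string)

-- ===== LEMMAS AND PROOFS =====

-- finishing A's loop state at end position e
def pvFinish (st : List Int × List Char) (e : Int) : List Int :=
  if st.2 ≠ [] then st.1 ++ [e - (st.2.length : Int)] else st.1

theorem pvBLoop_congr (l : List Char) {p q : Int} (h : p = q) : pvBLoop l p = pvBLoop l q := by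
  rw [h]

-- one unfolding step of pvBLoop on a cons
theorem pvBLoop_cons (c : Char) (cs : List Char) (p : Int) :
    pvBLoop (c :: cs) p =
      (if pvIsSymbol c then [p] else []) ++
        pvBLoop (cs.dropWhile (fun x => pvIsSymbol x == pvIsSymbol c))
          (p + 1 + ((cs.takeWhile (fun x => pvIsSymbol x == pvIsSymbol c)).length : Int)) := by
  rw [pvBLoop]
  simp only [List.takeWhile_cons, List.dropWhile_cons, beq_self_eq_true, if_true,
    List.length_cons]
  refine congrArg _ (pvBLoop_congr _ ?_)
  push_cast
  ring

theorem pvBLoop_cons_sym (c : Char) (cs : List Char) (p : Int) (hc : pvIsSymbol c = true) :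
    pvBLoop (c :: cs) p =
      p :: pvBLoop (cs.dropWhile pvIsSymbol)
          (p + 1 + ((cs.takeWhile pvIsSymbol).length : Int)) := by
  rw [pvBLoop_cons]
  have htw : (fun x => pvIsSymbol x == pvIsSymbol c) = pvIsSymbol := by
    funext x; rw [hc]; simp
  rw [htw, hc]
  simp

-- skipping a leading non-symbol char does not change B's output
theorem pvBLoop_cons_non (c : Char) (cs : List Char) (p : Int) (hc : pvIsSymbol c = false) :
    pvBLoop (c :: cs) p = pvBLoop cs (p + 1) := by
  rw [pvBLoop_cons, hc]
  simp only [Bool.false_eq_true, if_false, List.nil_append]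
  cases cs with
  | nil => simp
  | cons d ds =>
    cases hd : pvIsSymbol d with
    | true =>
      simp only [List.dropWhile_cons, List.takeWhile_cons, hd]
      norm_num
    | false =>
      rw [pvBLoop_cons d ds (p + 1)]
      simp only [hd, List.dropWhile_cons, List.takeWhile_cons, beq_self_eq_true, if_true,
        Bool.false_eq_true, if_false, List.nil_append, List.length_cons]
      refine pvBLoop_congr _ ?_
      push_cast
      ring

-- the mutual invariant: (main) from a fresh state, (mid) from inside a symbol run
theorem pvLoop_equiv (chars : List Char) :
    (∀ (i : Int) (res : List Int),
        pvFinish (pvALoop chars i res []) (i + (chars.length : Int)) = res ++ pvBLoop chars i) ∧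
    (∀ (i : Int) (res : List Int) (cur : List Char), cur ≠ [] →
        pvFinish (pvALoop chars i res cur) (i + (chars.length : Int)) =
          res ++ [i - (cur.length : Int)] ++
            pvBLoop (chars.dropWhile pvIsSymbol) (i + ((chars.takeWhile pvIsSymbol).length : Int))) := by
  induction chars with
  | nil =>
    constructor
    · intro i res
      simp [pvALoop, pvFinish, pvBLoop]
    · intro i res cur hcur
      simp [pvALoop, pvFinish, pvBLoop, hcur]
  | cons c cs ih =>
    obtain ⟨ihMain, ihMid⟩ := ih
    constructor
    · intro i res
      cases hc : pvIsSymbol c with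
      | true =>
        -- enters a symbol run with cur = [c]
        rw [pvALoop]
        rw [hc]
        simp only [if_true]
        rw [pvBLoop_cons_sym c cs i hc]
        have h1 := ihMid (i + 1) res [c] (by simp)
        have he : i + ((c :: cs).length : Int) = i + 1 + (cs.length : Int) := by
          simp; ring
        rw [he]
        simp only [List.nil_append]
        rw [h1]
        have h3 : i + 1 - (([c].length : Nat) : Int) = i := by simp
        rw [h3]
        simp [List.append_assoc]
      | false =>
        -- non-symbol char with empty cur: nothing happens
        rw [pvALoop]
        rw [hc]
        simp only [Bool.false_eq_true, if_false, ne_eq, not_true_eq_false]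
        have he : i + ((c :: cs).length : Int) = i + 1 + (cs.length : Int) := by
          simp; ring
        rw [he]
        rw [ihMain (i + 1) res, pvBLoop_cons_non c cs i hc]
    · intro i res cur hcur
      cases hc : pvIsSymbol c with
      | true =>
        -- symbol continues the run
        rw [pvALoop, hc]
        simp only [if_true]
        have h1 := ihMid (i + 1) res (cur ++ [c]) (by simp)
        have he : i + ((c :: cs).length : Int) = i + 1 + (cs.length : Int) := by
          simp; ring
        rw [he, h1]
        simp only [List.takeWhile_cons, List.dropWhile_cons, hc, if_true, List.length_cons,
          List.length_append, List.length_nil]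
        have h2 : i + 1 - (((cur.length + 1 : Nat)) : Int) = i - (cur.length : Int) := by
          push_cast; ring
        rw [h2]
        refine congrArg _ (pvBLoop_congr _ ?_)
        push_cast
        ring
      | false =>
        -- non-symbol char flushes the run
        rw [pvALoop, hc]
        simp only [Bool.false_eq_true, if_false, hcur, ne_eq, not_false_eq_true, if_true]
        have he : i + ((c :: cs).length : Int) = i + 1 + (cs.length : Int) := by
          simp; ring
        rw [he, ihMain (i + 1) (res ++ [i - (cur.length : Int)])]
        simp only [List.takeWhile_cons, List.dropWhile_cons, hc, Bool.false_eq_true, if_false,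
          List.length_nil]
        rw [← pvBLoop_cons_non c cs i hc]
        simp

-- ===== VERDICT (by name: the statement is the Claim_ definition above) =====
theorem extract_symbol_positions_spec : Claim_equal_extract_symbol_positions := by
  intro s _hDom
  unfold Spec_extract_symbol_positions extract_symbol_positions extract_symbol_positions_alt
  have h := (pvLoop_equiv s.toList).1 0 []
  simpa [pvFinish] using h
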